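-- pv_equiv track=rewrite | github.com/NovaSky-AI/SkyRL | skyrl-docs/convert_rst_to_mdx.py | convert_headings
-- ===== SOURCE A (Python) =====
-- def convert_headings(content):
--     """Convert RST headings to Markdown format."""
--     lines = content.split('\n')
--     result = []
--     i = 0
--
--     while i < len(lines):
--         line = lines[i]
--
--         # Check if next line is an underline
--         if i + 1 < len(lines):
--             next_line = lines[i + 1]
--             if len(next_line) > 0 and all(c in '=-~`^' for c in next_line) and len(next_line) >= 3:
--                 title = line.strip()
--                 if title:
--                     # Determine heading level based on character
--                     char = next_line[0]
--                     if char == '=':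
--                         heading = f"# {title}"
--                     elif char == '-':
--                         heading = f"## {title}"
--                     elif char == '~':
--                         heading = f"### {title}"
--                     elif char == '^':
--                         heading = f"#### {title}"
--                     else:
--                         heading = f"### {title}"
--
--                     result.append(heading)
--                     result.append('')  # Add blank line after heading
--                     i += 2  # Skip both the title and underline
--                     continue
--
--         result.append(line)
--         i += 1
--
--     return '\n'.join(result)
-- ===== SOURCE B (Python) =====
-- _PREFIX = {'=': '#', '-': '##', '~': '###', '^': '####'}
-- _UNDER = set('=-~`^')
--
-- def convert_headings(content):
--     """Convert RST headings to Markdown (two passes: build heading/skip tables, then emit)."""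
--     lines = content.split('\n')
--     n = len(lines)
--     headings = {}
--     skip = set()
--     i = 0
--     while i < n:
--         if i + 1 < n:
--             u = lines[i + 1]
--             if len(u) >= 3 and all(c in _UNDER for c in u):
--                 title = lines[i].strip()
--                 if title:
--                     headings[i] = _PREFIX.get(u[0], '###') + ' ' + title
--                     skip.add(i + 1)
--                     i += 2
--                     continue
--         i += 1
--     out = []
--     for j, line in enumerate(lines):
--         if j in skip:
--             continue
--         if j in headings:
--             out.append(headings[j])
--             out.append('')
--         else:
--             out.append(line)
--     return '\n'.join(out)
-- ===== Notes on version B (the rewrite author's own statement) =====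
-- stated objective: alternative
-- what changed: A interleaves detection and emission in one index walk with i+=2 lookahead consumption; B first scans the lines to precompute an index->heading table and a set of underline indices to skip, then a second pass over all enumerated lines emits from those tables.
import Mathlib
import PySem

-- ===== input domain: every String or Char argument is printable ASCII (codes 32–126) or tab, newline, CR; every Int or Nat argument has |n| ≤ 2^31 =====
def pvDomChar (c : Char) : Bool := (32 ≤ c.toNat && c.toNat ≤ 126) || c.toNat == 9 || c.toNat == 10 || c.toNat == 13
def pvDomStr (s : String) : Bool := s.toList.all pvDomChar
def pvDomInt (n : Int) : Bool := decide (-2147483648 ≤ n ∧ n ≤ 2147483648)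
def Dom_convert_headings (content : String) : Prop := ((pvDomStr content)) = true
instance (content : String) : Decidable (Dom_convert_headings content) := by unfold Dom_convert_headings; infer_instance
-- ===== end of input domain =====

-- B replaces A's interleaved lookahead-and-emit walk by two staged passes (precompute
-- heading/skip tables, then emit over all indices); objective: alternative decomposition, same cost.

-- ===== PORT A =====
-- A's heading if-chain on the underline's first character
def pvHeadingA (c : Char) (title : String) : String :=
  if c = '=' then "# " ++ title
  else if c = '-' then "## " ++ title
  else if c = '~' then "### " ++ title
  else if c = '^' then "#### " ++ title
  else "### " ++ title

-- c in '=-~`^'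
def pvUnderCharA (c : Char) : Bool :=
  c == '=' || c == '-' || c == '~' || c == '`' || c == '^'

-- A's while loop over line indices (result.append becomes cons)
def pvLoopA (lines : List String) (i : Nat) : List String :=
  if h : i < lines.length then
    let line := lines.getD i ""
    let fall := line :: pvLoopA lines (i + 1)
    if i + 1 < lines.length then
      let next := lines.getD (i + 1) ""
      if (decide (0 < next.toList.length) && next.toList.all pvUnderCharA
            && decide (3 ≤ next.toList.length) : Bool) then
        let title := PySem.Str.strip line
        if title ≠ "" then
          pvHeadingA (next.toList.headD ' ') title :: "" :: pvLoopA lines (i + 2)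
        else fall
      else fall
    else fall
  else []
termination_by lines.length - i

def convert_headings (content : String) : String :=
  let lines := (PySem.Str.split? content "\n").getD []
  PySem.Str.join "\n" (pvLoopA lines 0)

-- ===== PORT B =====
-- _PREFIX.get(char, '###')
def pvPrefixB (c : Char) : String :=
  (PySem.Dict.ofList [('=', "#"), ('-', "##"), ('~', "###"), ('^', "####")]).getD c "###"

-- c in _UNDER  (a set)
def pvUnderSetB : PySem.Set Char := PySem.Set.ofList ['=', '-', '~', '`', '^']

-- B's first pass: record i ↦ heading and mark i+1 as a skip index, same consumption
def pvPass1 (lines : List String) (i : Nat)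
    (hd : PySem.Dict Nat String) (sk : PySem.Set Nat) :
    PySem.Dict Nat String × PySem.Set Nat :=
  if h : i < lines.length then
    if i + 1 < lines.length then
      let u := lines.getD (i + 1) ""
      if (decide (3 ≤ u.toList.length) && u.toList.all (pvUnderSetB.contains ·) : Bool) then
        let title := PySem.Str.strip (lines.getD i "")
        if title ≠ "" then
          pvPass1 lines (i + 2)
            (hd.insert i (pvPrefixB (u.toList.headD ' ') ++ " " ++ title))
            (sk.add (i + 1))
        else pvPass1 lines (i + 1) hd sk
      else pvPass1 lines (i + 1) hd sk
    else pvPass1 lines (i + 1) hd sk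
  else (hd, sk)
termination_by lines.length - i

-- B's second pass: for j, line in enumerate(lines)
def pvEmitB (lines : List String) (j : Nat)
    (hd : PySem.Dict Nat String) (sk : PySem.Set Nat) : List String :=
  match lines with
  | [] => []
  | line :: rest =>
    if sk.contains j then pvEmitB rest (j + 1) hd sk
    else if hd.contains j then
      hd.getD j "" :: "" :: pvEmitB rest (j + 1) hd sk
    else line :: pvEmitB rest (j + 1) hd sk

def convert_headings_alt (content : String) : String :=
  let lines := (PySem.Str.split? content "\n").getD []
  let t := pvPass1 lines 0 PySem.Dict.empty PySem.Set.empty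
  PySem.Str.join "\n" (pvEmitB lines 0 t.1 t.2)

-- ===== PRECONDITION & SPEC =====
def Spec_convert_headings (content : String) (out : String) : Prop := out = convert_headings_alt content
instance (content : String) (out : String) : Decidable (Spec_convert_headings content out) := by unfold Spec_convert_headings; infer_instance

-- ===== CLAIM (what is proved, stated in full; the proofs are below) =====
def Claim_equal_convert_headings : Prop := ∀ (content : String), Dom_convert_headings content → Spec_convert_headings content (convert_headings content)

-- ===== LEMMAS AND PROOFS =====

-- B's set-membership test agrees with A's character chain
lemma pvUnderChar_eq (c : Char) : pvUnderSetB.contains c = pvUnderCharA c := by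
  have h : pvUnderSetB = ['=', '-', '~', '`', '^'] := by decide
  rw [PySem.Set.contains, h, pvUnderCharA]
  simp [beq_eq_decide, Bool.or_assoc]

-- the two underline tests agree
lemma pvUnder_eq (u : String) :
    (decide (3 ≤ u.toList.length) && u.toList.all (pvUnderSetB.contains ·) : Bool)
      = (decide (0 < u.toList.length) && u.toList.all pvUnderCharA
            && decide (3 ≤ u.toList.length) : Bool) := by
  have hall : u.toList.all (pvUnderSetB.contains ·) = u.toList.all pvUnderCharA := by
    simp only [pvUnderChar_eq]
  rw [hall]
  by_cases h3 : 3 ≤ u.toList.length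
  · have h0 : 0 < u.toList.length := by omega
    rw [decide_eq_true h3, decide_eq_true h0]
    simp only [Bool.true_and, Bool.and_true]
  · rw [decide_eq_false h3]
    simp only [Bool.and_false, Bool.false_and]

-- the two heading builders agree on underline characters
lemma pvHeading_eq (c : Char) (t : String) (h : pvUnderCharA c = true) :
    pvPrefixB c ++ " " ++ t = pvHeadingA c t := by
  simp only [pvUnderCharA, Bool.or_eq_true, beq_iff_eq] at h
  rcases h with ((((h | h) | h) | h) | h) <;> subst h <;> rfl

-- pvPass1 only touches indices ≥ i: lookups below i are unchanged
lemma pvPass1_stable (lines : List String) (i : Nat)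
    (hd : PySem.Dict Nat String) (sk : PySem.Set Nat) (j : Nat) (hj : j < i) :
    (pvPass1 lines i hd sk).1.get? j = hd.get? j ∧
    (pvPass1 lines i hd sk).2.contains j = sk.contains j := by
  fun_induction pvPass1 lines i hd sk with
  | case1 i hd sk h hn u hu title ht ih =>
      have h2 : j < i + 2 := by omega
      obtain ⟨ih1, ih2⟩ := ih h2
      refine ⟨?_, ?_⟩
      · rw [ih1, PySem.Dict.get?_insert]
        simp [show j ≠ i by omega]
      · rw [ih2]
        rw [Bool.eq_iff_iff, PySem.Set.contains_iff, PySem.Set.contains_iff,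
            PySem.Set.mem_add]
        constructor
        · rintro (hm | hm)
          · exact hm
          · omega
        · exact Or.inl
  | case2 i hd sk h hn u hu title ht ih => exact ih (by omega)
  | case3 i hd sk h hn u hu ih => exact ih (by omega)
  | case4 i hd sk h hn ih => exact ih (by omega)
  | case5 i hd sk h => exact ⟨rfl, rfl⟩

-- a fallthrough step of the emission: index i is in neither table, so the raw line is emitted
lemma pvEmit_step (lines : List String) (i : Nat)
    (hd : PySem.Dict Nat String) (sk : PySem.Set Nat)
    (h : i < lines.length)
    (hhd : ∀ k, hd.contains k = true → k < i)
    (hsk : ∀ k, sk.contains k = true → k < i) :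
    pvEmitB (List.drop i lines) i (pvPass1 lines (i + 1) hd sk).1 (pvPass1 lines (i + 1) hd sk).2
      = lines.getD i "" ::
        pvEmitB (List.drop (i + 1) lines) (i + 1)
          (pvPass1 lines (i + 1) hd sk).1 (pvPass1 lines (i + 1) hd sk).2 := by
  obtain ⟨hst1, hst2⟩ := pvPass1_stable lines (i + 1) hd sk i (by omega)
  have hcsk : (pvPass1 lines (i + 1) hd sk).2.contains i = false := by
    rw [hst2, Bool.eq_false_iff]
    intro hc
    exact absurd (hsk i hc) (lt_irrefl i)
  have hchd : (pvPass1 lines (i + 1) hd sk).1.contains i = false := by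
    rw [PySem.Dict.contains_eq_isSome_get?, hst1, ← PySem.Dict.contains_eq_isSome_get?,
        Bool.eq_false_iff]
    intro hc
    exact absurd (hhd i hc) (lt_irrefl i)
  rw [← List.getElem_cons_drop h, List.getD_eq_getElem lines "" h]
  simp only [pvEmitB, hcsk, hchd, Bool.false_eq_true, if_false]

-- main invariant: emission from index i with the tables built from index i reproduces A's loop
lemma pvMain (lines : List String) (i : Nat)
    (hd : PySem.Dict Nat String) (sk : PySem.Set Nat)
    (hhd : ∀ k, hd.contains k = true → k < i)
    (hsk : ∀ k, sk.contains k = true → k < i) :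
    pvEmitB (lines.drop i) i (pvPass1 lines i hd sk).1 (pvPass1 lines i hd sk).2
      = pvLoopA lines i := by
  fun_induction pvPass1 lines i hd sk with
  | case1 i hd sk h hn u hu title ht ih =>
      -- invariants for the extended tables
      have hhd' : ∀ k, (hd.insert i (pvPrefixB (u.toList.headD ' ') ++ " " ++ title)).contains k = true → k < i + 2 := by
        intro k hk
        rw [PySem.Dict.contains_insert] at hk
        simp only [Bool.or_eq_true] at hk
        rcases hk with hk | hk
        · have : k = i := by simpa using hk
          omega
        · have := hhd k hk; omega
      have hsk' : ∀ k, (sk.add (i + 1)).contains k = true → k < i + 2 := by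
        intro k hk
        rw [PySem.Set.contains_iff, PySem.Set.mem_add] at hk
        rcases hk with hk | hk
        · have := hsk k ((PySem.Set.contains_iff sk k).mpr hk); omega
        · omega
      have heq := ih hhd' hsk'
      -- the underline's first character is an underline character
      have hu' := hu
      rw [Bool.and_eq_true] at hu'
      have hlen : 3 ≤ u.toList.length := of_decide_eq_true hu'.1
      have hne : u.toList ≠ [] := by
        intro hnil
        rw [hnil] at hlen
        simp at hlen
      have hmem : u.toList.headD ' ' ∈ u.toList := by
        cases hcl : u.toList with
        | nil => exact absurd hcl hne
        | cons c cs => simp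
      have hchar : pvUnderCharA (u.toList.headD ' ') = true := by
        rw [← pvUnderChar_eq]
        exact List.all_eq_true.mp hu'.2 _ hmem
      -- lookups at i and i + 1 in the final tables
      obtain ⟨hstA1, hstA2⟩ := pvPass1_stable lines (i + 2)
        (hd.insert i (pvPrefixB (u.toList.headD ' ') ++ " " ++ title)) (sk.add (i + 1)) i (by omega)
      obtain ⟨hstB1, hstB2⟩ := pvPass1_stable lines (i + 2)
        (hd.insert i (pvPrefixB (u.toList.headD ' ') ++ " " ++ title)) (sk.add (i + 1)) (i + 1) (by omega)
      have hski : (pvPass1 lines (i + 2) (hd.insert i (pvPrefixB (u.toList.headD ' ') ++ " " ++ title)) (sk.add (i + 1))).2.contains i = false := by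
        rw [hstA2, Bool.eq_false_iff]
        intro hc
        rw [PySem.Set.contains_iff, PySem.Set.mem_add] at hc
        rcases hc with hc | hc
        · exact absurd (hsk i ((PySem.Set.contains_iff sk i).mpr hc)) (lt_irrefl i)
        · omega
      have hget : (pvPass1 lines (i + 2) (hd.insert i (pvPrefixB (u.toList.headD ' ') ++ " " ++ title)) (sk.add (i + 1))).1.get? i = some (pvPrefixB (u.toList.headD ' ') ++ " " ++ title) := by
        rw [hstA1, PySem.Dict.get?_insert_self]
      have hhdi : (pvPass1 lines (i + 2) (hd.insert i (pvPrefixB (u.toList.headD ' ') ++ " " ++ title)) (sk.add (i + 1))).1.contains i = true := by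
        rw [PySem.Dict.contains_eq_isSome_get?, hget]; rfl
      have hgd : (pvPass1 lines (i + 2) (hd.insert i (pvPrefixB (u.toList.headD ' ') ++ " " ++ title)) (sk.add (i + 1))).1.getD i "" = pvHeadingA (u.toList.headD ' ') title := by
        rw [PySem.Dict.getD_eq_get?_getD, hget, Option.getD_some]
        exact pvHeading_eq _ _ hchar
      have hsk1 : (pvPass1 lines (i + 2) (hd.insert i (pvPrefixB (u.toList.headD ' ') ++ " " ++ title)) (sk.add (i + 1))).2.contains (i + 1) = true := by
        rw [hstB2, PySem.Set.contains_iff, PySem.Set.mem_add]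
        exact Or.inr rfl
      -- unfold two emission steps on the left
      have h1 : i + 1 < lines.length := hn
      rw [← List.getElem_cons_drop h, ← List.getElem_cons_drop h1]
      simp only [pvEmitB, hski, hhdi, hgd, hsk1, Bool.false_eq_true, if_false, if_true,
        show i + 1 + 1 = i + 2 from rfl]
      -- unfold A's loop on the right
      conv_rhs => rw [pvLoopA]
      have hu2 : (decide (3 ≤ (lines.getD (i + 1) "").toList.length)
          && (lines.getD (i + 1) "").toList.all (pvUnderSetB.contains ·)) = true := hu
      have ht2 : PySem.Str.strip (lines.getD i "") ≠ "" := ht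
      simp only [dif_pos h, if_pos hn, ← pvUnder_eq, hu2, if_true, if_pos ht2]
      exact congrArg _ (congrArg _ heq)
  | case2 i hd sk h hn u hu title ht ih =>
      have hhd1 : ∀ k, hd.contains k = true → k < i + 1 := fun k hk => by have := hhd k hk; omega
      have hsk1 : ∀ k, sk.contains k = true → k < i + 1 := fun k hk => by have := hsk k hk; omega
      rw [pvEmit_step lines i hd sk h hhd hsk, ih hhd1 hsk1]
      conv_rhs => rw [pvLoopA]
      have hu2 : (decide (3 ≤ (lines.getD (i + 1) "").toList.length)
          && (lines.getD (i + 1) "").toList.all (pvUnderSetB.contains ·)) = true := hu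
      have ht2 : ¬ PySem.Str.strip (lines.getD i "") ≠ "" := ht
      simp only [dif_pos h, if_pos hn, ← pvUnder_eq, hu2, if_true, if_neg ht2]
  | case3 i hd sk h hn u hu ih =>
      have hhd1 : ∀ k, hd.contains k = true → k < i + 1 := fun k hk => by have := hhd k hk; omega
      have hsk1 : ∀ k, sk.contains k = true → k < i + 1 := fun k hk => by have := hsk k hk; omega
      rw [pvEmit_step lines i hd sk h hhd hsk, ih hhd1 hsk1]
      conv_rhs => rw [pvLoopA]
      have hu2 : ¬ ((decide (3 ≤ (lines.getD (i + 1) "").toList.length)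
          && (lines.getD (i + 1) "").toList.all (pvUnderSetB.contains ·)) = true) := hu
      simp only [dif_pos h, if_pos hn, ← pvUnder_eq, if_neg hu2]
  | case4 i hd sk h hn ih =>
      have hhd1 : ∀ k, hd.contains k = true → k < i + 1 := fun k hk => by have := hhd k hk; omega
      have hsk1 : ∀ k, sk.contains k = true → k < i + 1 := fun k hk => by have := hsk k hk; omega
      rw [pvEmit_step lines i hd sk h hhd hsk, ih hhd1 hsk1]
      conv_rhs => rw [pvLoopA]
      simp only [dif_pos h, if_neg hn]
  | case5 i hd sk h =>
      rw [List.drop_eq_nil_of_le (by omega), pvEmitB]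
      rw [pvLoopA]
      simp only [dif_neg h]

-- ===== VERDICT (by name: the statement is the Claim_ definition above) =====
theorem convert_headings_spec : Claim_equal_convert_headings := by
  intro content _
  unfold Spec_convert_headings convert_headings convert_headings_alt
  have h := pvMain ((PySem.Str.split? content "\n").getD []) 0 PySem.Dict.empty PySem.Set.empty
    (by intro k hk; rw [PySem.Dict.contains_empty] at hk; exact absurd hk (by simp))
    (by intro k hk; exact absurd hk (by simp [PySem.Set.contains, PySem.Set.empty]))
  rw [List.drop_zero] at h
  show PySem.Str.join "\n" _ = PySem.Str.join "\n" _
  exact congrArg _ h.symm
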